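-- pv_equiv track=rewrite | github.com/Ham4690/AOJ | lesson/lesson-ITP1/ITP1_7/b.py | checkConnum
-- ===== SOURCE A (Python) =====
-- def checkConnum(n, x):
--     cnt = 0
--     for i in range(1,n+1):
--         j = i + 1
--         k = j + 1
--         while((i+j+k) <= x and j <= n ):
--             while((i+j+k) <= x and k <= n):
--                 if((i+j+k) == x ):
--                     cnt += 1
--                 k+= 1
--             j += 1
--             k = j + 1
--
--     return cnt
-- ===== SOURCE B (Python) =====
-- def checkConnum(n, x):
--     cnt = 0
--     for i in range(1, n + 1):
--         # count j with i < j < k <= n and j + k = x - i, where k = x - i - j: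
--         # j >= x - i - n  (k <= n),  2*j <= x - i - 1  (j < k),  i < j <= n
--         lo = max(i + 1, x - i - n)
--         hi = min(n, (x - i - 1) // 2)
--         if lo <= hi:
--             cnt += hi - lo + 1
--     return cnt
-- ===== Notes on version B (the rewrite author's own statement) =====
-- stated objective: faster
-- what changed: Replaced A's triple nested scan with a per-i closed-form interval count: for each i the valid j satisfy max(i+1, x-i-n) <= j <= min(n, (x-i-1)//2), so both inner loops disappear.
import Mathlib
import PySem

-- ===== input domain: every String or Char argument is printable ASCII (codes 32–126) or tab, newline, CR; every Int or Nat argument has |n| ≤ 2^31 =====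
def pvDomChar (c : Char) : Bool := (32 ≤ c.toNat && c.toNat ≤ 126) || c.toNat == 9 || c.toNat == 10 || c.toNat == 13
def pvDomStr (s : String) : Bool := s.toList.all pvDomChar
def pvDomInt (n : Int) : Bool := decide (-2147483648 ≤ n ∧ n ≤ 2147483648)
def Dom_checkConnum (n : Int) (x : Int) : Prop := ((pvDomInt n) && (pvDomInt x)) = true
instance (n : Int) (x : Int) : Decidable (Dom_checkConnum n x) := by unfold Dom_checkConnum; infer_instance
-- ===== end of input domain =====

-- B counts, for each i, the valid j as one interval [max(i+1, x-i-n), min(n, (x-i-1)//2)]: no inner loops.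

-- ===== PORT A =====
-- inner 'while((i+j+k) <= x and k <= n)' loop of A; fuel only bounds the iteration count
-- (fuel = (n+1-k).toNat at the call site covers every iteration, since the guard needs k ≤ n)
def checkConnumInnerA (n x i j : Int) (fuel : Nat) (k : Int) (cnt : Int) : Int :=
  match fuel with
  | 0 => cnt
  | f + 1 =>
    if i + j + k ≤ x ∧ k ≤ n then
      checkConnumInnerA n x i j f (k + 1) (if i + j + k = x then cnt + 1 else cnt)
    else cnt

-- outer 'while((i+j+k) <= x and j <= n)' loop of A (at each test k = j + 1, as A resets k)
def checkConnumOuterA (n x i : Int) (fuel : Nat) (j : Int) (cnt : Int) : Int :=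
  match fuel with
  | 0 => cnt
  | f + 1 =>
    if i + j + (j + 1) ≤ x ∧ j ≤ n then
      checkConnumOuterA n x i f (j + 1) (checkConnumInnerA n x i j (n + 1 - (j + 1)).toNat (j + 1) cnt)
    else cnt

def checkConnum (n : Int) (x : Int) : Int :=
  (PySem.List.pyRange 1 (n + 1) 1).foldl
    (fun cnt i => checkConnumOuterA n x i (n + 1 - (i + 1)).toNat (i + 1) cnt) 0

-- ===== PORT B =====
def checkConnum_alt (n : Int) (x : Int) : Int :=
  (PySem.List.pyRange 1 (n + 1) 1).foldl (fun cnt i =>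
    let lo := max (i + 1) (x - i - n)
    let hi := min n (PySem.Int.floordiv (x - i - 1) 2)
    if lo ≤ hi then cnt + (hi - lo + 1) else cnt) 0

-- ===== PRECONDITION & SPEC =====
def Spec_checkConnum (n : Int) (x : Int) (out : Int) : Prop := out = checkConnum_alt n x
instance (n : Int) (x : Int) (out : Int) : Decidable (Spec_checkConnum n x out) := by unfold Spec_checkConnum; infer_instance

-- ===== CLAIM (what is proved, stated in full; the proofs are below) =====
def Claim_equal_checkConnum : Prop := ∀ (n : Int) (x : Int), Dom_checkConnum n x → Spec_checkConnum n x (checkConnum n x)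

-- ===== LEMMAS AND PROOFS =====

-- A's inner loop adds 1 exactly when the unique candidate k' = x - i - j lies in [k, n].
theorem checkConnumInnerA_eq (n x i j : Int) (fuel : Nat) :
    ∀ (k cnt : Int), (n + 1 - k).toNat ≤ fuel →
      checkConnumInnerA n x i j fuel k cnt =
        if k ≤ x - i - j ∧ x - i - j ≤ n then cnt + 1 else cnt := by
  induction fuel with
  | zero =>
    intro k cnt hf
    rw [checkConnumInnerA, if_neg (by omega)]
  | succ f ih =>
    intro k cnt hf
    rw [checkConnumInnerA]
    by_cases h : i + j + k ≤ x ∧ k ≤ n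
    · rw [if_pos h, ih (k + 1) _ (by omega)]
      split_ifs <;> omega
    · rw [if_neg h, if_neg (by omega)]

theorem foldl_id_of_fix {α β : Type} (f : β → α → β) (l : List α)
    (h : ∀ c a, a ∈ l → f c a = c) : ∀ c, l.foldl f c = c := by
  induction l with
  | nil => intro c; rfl
  | cons a t ih =>
    intro c
    rw [List.foldl_cons, h c a (List.mem_cons_self),
        ih (fun c a ha => h c a (List.mem_cons_of_mem _ ha))]

-- A's outer loop equals B's inner fold starting at j.
theorem checkConnumOuterA_eq (n x i : Int) (fuel : Nat) :
    ∀ (j cnt : Int), (n + 1 - j).toNat ≤ fuel →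
      checkConnumOuterA n x i fuel j cnt =
        (PySem.List.pyRange j (n + 1) 1).foldl (fun c j' =>
          if j' < x - i - j' ∧ x - i - j' ≤ n then c + 1 else c) cnt := by
  induction fuel with
  | zero =>
    intro j cnt hf
    rw [checkConnumOuterA, PySem.List.pyRange_one_eq_nil (by omega), List.foldl_nil]
  | succ f ih =>
    intro j cnt hf
    rw [checkConnumOuterA]
    by_cases h : i + j + (j + 1) ≤ x ∧ j ≤ n
    · rw [if_pos h, ih (j + 1) _ (by omega),
          checkConnumInnerA_eq n x i j _ (j + 1) cnt (by omega),
          PySem.List.pyRange_one_cons (by omega : j < n + 1), List.foldl_cons]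
      have he : (if j + 1 ≤ x - i - j ∧ x - i - j ≤ n then cnt + 1 else cnt)
          = (if j < x - i - j ∧ x - i - j ≤ n then cnt + 1 else cnt) := by
        split_ifs <;> omega
      rw [he]
    · rw [if_neg h]
      by_cases hj : n + 1 ≤ j
      · rw [PySem.List.pyRange_one_eq_nil hj, List.foldl_nil]
      · refine (foldl_id_of_fix _ _ (fun c j' hj' => ?_) cnt).symm
        rw [PySem.List.mem_pyRange_one] at hj'
        rw [if_neg (by omega)]

-- B's interval length equals the number of j in [a, n] with j < x - i - j ≤ n.
theorem foldl_count (n x i : Int) (m : Nat) :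
    ∀ (a cnt : Int), (n + 1 - a).toNat ≤ m →
      (PySem.List.pyRange a (n + 1) 1).foldl (fun c j =>
          if j < x - i - j ∧ x - i - j ≤ n then c + 1 else c) cnt
        = (if max a (x - i - n) ≤ min n (PySem.Int.floordiv (x - i - 1) 2) then
            cnt + (min n (PySem.Int.floordiv (x - i - 1) 2) - max a (x - i - n) + 1)
          else cnt) := by
  have hq : (PySem.Int.floordiv (x - i - 1) 2) * 2 ≤ x - i - 1 ∧
      x - i - 1 < ((PySem.Int.floordiv (x - i - 1) 2) + 1) * 2 :=
    (PySem.Int.floordiv_eq_iff_of_pos (by norm_num)).mp rfl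
  induction m with
  | zero =>
    intro a cnt hf
    rw [PySem.List.pyRange_one_eq_nil (by omega), List.foldl_nil, if_neg (by omega)]
  | succ m ih =>
    intro a cnt hf
    by_cases ha : a ≤ n
    · rw [PySem.List.pyRange_one_cons (by omega : a < n + 1), List.foldl_cons,
          ih (a + 1) _ (by omega)]
      split_ifs <;> omega
    · rw [PySem.List.pyRange_one_eq_nil (by omega), List.foldl_nil, if_neg (by omega)]

-- ===== VERDICT (by name: the statement is the Claim_ definition above) =====
theorem checkConnum_spec : Claim_equal_checkConnum := by
  intro n x _
  unfold Spec_checkConnum checkConnum checkConnum_alt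
  congr 1
  funext cnt i
  rw [checkConnumOuterA_eq n x i _ (i + 1) cnt le_rfl,
      foldl_count n x i (n + 1 - (i + 1)).toNat (i + 1) cnt le_rfl]
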